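-- pv_equiv track=rewrite | github.com/d4rth-f4der/Univer_python | Lab-04/Lab-04-06.py | make_number_from_digits_squares
-- ===== SOURCE A (Python) =====
-- def make_number_from_digits_squares(num: int) -> int:
--     out_number = 0
--     decimal_place = 1
--     while num > 0:
--         out_number += (num % 10)**2 * decimal_place
--         if (num % 10)**2 < 10: decimal_place *= 10
--         else: decimal_place *= 100
--         num = num // 10
--
--     return out_number
-- ===== SOURCE B (Python) =====
-- def make_number_from_digits_squares(num: int) -> int:
--     # Phase 1: collect the decimal digits, least significant first.
--     digits = []
--     while num > 0:
--         digits.append(num % 10)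
--         num //= 10
--     # Phase 2: combine most-significant first, shifting the accumulator
--     # by the width of each digit's square.
--     out = 0
--     for d in reversed(digits):
--         sq = d * d
--         out = out * (10 if sq < 10 else 100) + sq
--     return out
-- ===== Notes on version B (the rewrite author's own statement) =====
-- stated objective: alternative
-- what changed: Replaces A's single-pass loop that places each square with a growing place-value multiplier by a two-phase version: first collect the digit list, then fold over it most-significant-first, shifting the accumulator left by the square's width.
import Mathlib
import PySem

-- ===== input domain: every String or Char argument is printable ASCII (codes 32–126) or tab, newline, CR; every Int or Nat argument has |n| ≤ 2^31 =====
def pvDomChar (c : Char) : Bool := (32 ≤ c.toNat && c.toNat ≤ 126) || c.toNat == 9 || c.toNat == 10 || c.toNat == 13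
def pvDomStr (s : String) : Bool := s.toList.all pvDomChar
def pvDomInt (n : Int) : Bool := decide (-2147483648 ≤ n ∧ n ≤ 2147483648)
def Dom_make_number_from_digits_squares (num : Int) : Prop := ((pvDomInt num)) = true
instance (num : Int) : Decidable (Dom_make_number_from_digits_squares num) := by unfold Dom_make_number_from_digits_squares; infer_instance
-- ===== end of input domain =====

-- B replaces A's single-pass place-value accumulation by a two-phase digit-list
-- + most-significant-first shift-accumulate fold (alternative structure, same cost).


-- ===== PORT A =====
-- A's while-loop: out += (num % 10)**2 * decimal_place; the place multiplier
-- grows by 10 or 100 depending on the square's width; num //= 10.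
def pvALoop (num out place : Int) : Int :=
  if _h : num > 0 then
    pvALoop (PySem.Int.floordiv num 10)
      (out + (PySem.Int.mod num 10) ^ 2 * place)
      (if (PySem.Int.mod num 10) ^ 2 < 10 then place * 10 else place * 100)
  else out
termination_by num.toNat
decreasing_by
  rw [PySem.Int.floordiv_eq_ediv_of_pos (by norm_num : (0:Int) < 10)]
  omega

def make_number_from_digits_squares (num : Int) : Int := pvALoop num 0 1

-- ===== PORT B =====
-- B phase 1: digits.append(num % 10); num //= 10
def pvDigitsLoop (num : Int) (digits : List Int) : List Int :=
  if _h : num > 0 then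
    pvDigitsLoop (PySem.Int.floordiv num 10) (digits ++ [PySem.Int.mod num 10])
  else digits
termination_by num.toNat
decreasing_by
  rw [PySem.Int.floordiv_eq_ediv_of_pos (by norm_num : (0:Int) < 10)]
  omega

-- B phase 2: for d in reversed(digits): out = out * (10 if sq < 10 else 100) + sq
def make_number_from_digits_squares_alt (num : Int) : Int :=
  (pvDigitsLoop num []).reverse.foldl
    (fun out d => out * (if d * d < 10 then 10 else 100) + d * d) 0

-- ===== PRECONDITION & SPEC =====
def Spec_make_number_from_digits_squares (num : Int) (out : Int) : Prop := out = make_number_from_digits_squares_alt num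
instance (num : Int) (out : Int) : Decidable (Spec_make_number_from_digits_squares num out) := by unfold Spec_make_number_from_digits_squares; infer_instance

-- ===== CLAIM (what is proved, stated in full; the proofs are below) =====
def Claim_equal_make_number_from_digits_squares : Prop := ∀ (num : Int), Dom_make_number_from_digits_squares num → Spec_make_number_from_digits_squares num (make_number_from_digits_squares num)

-- ===== LEMMAS AND PROOFS =====

-- one-step unfoldings of the two loops
lemma pvALoop_unfold (num out place : Int) :
    pvALoop num out place =
      if num > 0 then
        pvALoop (PySem.Int.floordiv num 10)
          (out + (PySem.Int.mod num 10) ^ 2 * place)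
          (if (PySem.Int.mod num 10) ^ 2 < 10 then place * 10 else place * 100)
      else out := by
  rw [pvALoop]
  split <;> rfl

lemma pvDigitsLoop_unfold (num : Int) (digits : List Int) :
    pvDigitsLoop num digits =
      if num > 0 then
        pvDigitsLoop (PySem.Int.floordiv num 10) (digits ++ [PySem.Int.mod num 10])
      else digits := by
  rw [pvDigitsLoop]
  split <;> rfl

-- the digits accumulator factors out
lemma pvDigitsLoop_acc (k : Nat) : ∀ num : Int, num.toNat ≤ k → ∀ acc : List Int,
    pvDigitsLoop num acc = acc ++ pvDigitsLoop num [] := by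
  induction k with
  | zero =>
    intro num hle acc
    have hnp : ¬ num > 0 := by omega
    rw [pvDigitsLoop_unfold num acc, pvDigitsLoop_unfold num []]
    simp [hnp]
  | succ k ih =>
    intro num hle acc
    by_cases hp : num > 0
    · have hdiv : PySem.Int.floordiv num 10 = num / 10 :=
        PySem.Int.floordiv_eq_ediv_of_pos (by norm_num)
      have hk : (PySem.Int.floordiv num 10).toNat ≤ k := by rw [hdiv]; omega
      rw [pvDigitsLoop_unfold num acc, pvDigitsLoop_unfold num []]
      simp only [hp, if_pos]
      rw [ih _ hk, ih _ hk ([] ++ [PySem.Int.mod num 10])]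
      simp [List.append_assoc]
    · rw [pvDigitsLoop_unfold num acc, pvDigitsLoop_unfold num []]
      simp [hp]

-- recurrence for B: peel off the least significant digit
lemma alt_pos (num : Int) (hp : num > 0) :
    make_number_from_digits_squares_alt num =
      make_number_from_digits_squares_alt (PySem.Int.floordiv num 10) *
        (if (PySem.Int.mod num 10) * (PySem.Int.mod num 10) < 10 then 10 else 100) +
      (PySem.Int.mod num 10) * (PySem.Int.mod num 10) := by
  unfold make_number_from_digits_squares_alt
  rw [pvDigitsLoop_unfold num []]
  simp only [hp, if_pos]
  rw [pvDigitsLoop_acc (PySem.Int.floordiv num 10).toNat _ le_rfl]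
  simp [List.foldl_append]

lemma alt_nonpos (num : Int) (hnp : ¬ num > 0) :
    make_number_from_digits_squares_alt num = 0 := by
  unfold make_number_from_digits_squares_alt
  rw [pvDigitsLoop_unfold num []]
  simp [hnp]

-- A's loop computes out + place * B
lemma pvALoop_eq (k : Nat) : ∀ num : Int, num.toNat ≤ k → ∀ out place : Int,
    pvALoop num out place = out + place * make_number_from_digits_squares_alt num := by
  induction k with
  | zero =>
    intro num hle out place
    have hnp : ¬ num > 0 := by omega
    rw [pvALoop_unfold, alt_nonpos num hnp]
    simp [hnp]
  | succ k ih =>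
    intro num hle out place
    by_cases hp : num > 0
    · have hdiv : PySem.Int.floordiv num 10 = num / 10 :=
        PySem.Int.floordiv_eq_ediv_of_pos (by norm_num)
      have hk : (PySem.Int.floordiv num 10).toNat ≤ k := by rw [hdiv]; omega
      have hsq : (PySem.Int.mod num 10) ^ 2 = (PySem.Int.mod num 10) * (PySem.Int.mod num 10) :=
        sq (PySem.Int.mod num 10)
      rw [pvALoop_unfold]
      simp only [hp, if_pos]
      rw [ih _ hk, alt_pos num hp, hsq]
      split_ifs <;> ring
    · rw [pvALoop_unfold, alt_nonpos num hp]
      simp [hp]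

-- ===== VERDICT (by name: the statement is the Claim_ definition above) =====
theorem make_number_from_digits_squares_spec : Claim_equal_make_number_from_digits_squares := by
  intro num _
  unfold Spec_make_number_from_digits_squares make_number_from_digits_squares
  rw [pvALoop_eq num.toNat num le_rfl]
  ring
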